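-- pv_equiv track=rewrite | github.com/rivten/aoc-2021 | 12/nicolr/main.py | update_can_visit
-- ===== SOURCE A (Python) =====
-- from collections import Counter, UserList
--
-- def update_can_visit(can_visit_dict, path, max_visit):
-- 	can_visit_dict = can_visit_dict.copy()
-- 	last_visited_cave = path[-1]
-- 	visited_small_cave_list = list(filter(is_small_cave, path))
-- 	if last_visited_cave in visited_small_cave_list and Counter(visited_small_cave_list).most_common()[0][1] >= max_visit:
-- 		for cave in filter(lambda c: can_visit_dict[c], visited_small_cave_list):
-- 			can_visit_dict[cave] = False
-- 	return can_visit_dict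
--
-- def is_small_cave(cave):
-- 	return cave.islower() and cave not in ["start", "end"]
-- ===== SOURCE B (Python) =====
-- def is_small_cave(cave):
--     return cave.islower() and cave not in ["start", "end"]
--
-- def update_can_visit(can_visit_dict, path, max_visit):
--     if not is_small_cave(path[-1]):
--         return dict(can_visit_dict)
--     # sort the small caves of the path; a repeated cave becomes a run whose
--     # length is its visit count, so one run-length scan finds the trigger
--     small_sorted = sorted(c for c in path if is_small_cave(c))
--     trigger = False
--     prev, run = None, 0
--     for c in small_sorted:
--         run = run + 1 if c == prev else 1
--         prev = c
--         if run >= max_visit: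
--             trigger = True
--             break
--     if not trigger:
--         return dict(can_visit_dict)
--     return {k: False if is_small_cave(k) and k in path else v
--             for k, v in can_visit_dict.items()}
-- ===== Notes on version B (the rewrite author's own statement) =====
-- stated objective: alternative
-- what changed: B replaces A's hash-count (Counter) plus most_common() sort plus copy-and-mutate loop over the path by sorting the small caves and detecting the trigger with a single run-length scan that breaks early, then rebuilds the dict in one comprehension over its own items testing path membership directly.
import Mathlib
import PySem

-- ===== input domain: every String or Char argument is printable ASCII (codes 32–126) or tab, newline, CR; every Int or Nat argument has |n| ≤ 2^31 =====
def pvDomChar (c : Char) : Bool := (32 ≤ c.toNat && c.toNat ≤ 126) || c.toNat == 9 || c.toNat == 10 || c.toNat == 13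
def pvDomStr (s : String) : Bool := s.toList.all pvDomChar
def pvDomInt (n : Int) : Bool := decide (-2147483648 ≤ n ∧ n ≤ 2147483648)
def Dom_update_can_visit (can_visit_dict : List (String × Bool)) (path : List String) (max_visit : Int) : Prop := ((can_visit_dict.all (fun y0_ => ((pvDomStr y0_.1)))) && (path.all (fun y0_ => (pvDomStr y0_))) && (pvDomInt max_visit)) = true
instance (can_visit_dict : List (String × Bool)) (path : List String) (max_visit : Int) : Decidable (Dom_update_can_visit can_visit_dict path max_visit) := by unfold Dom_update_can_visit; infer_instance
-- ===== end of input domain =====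

-- B replaces A's Counter + most_common() sort + copy-and-mutate walk over the path by a sort of the
-- small caves and a single run-length scan with early exit for the trigger, then one comprehension
-- over the dict's own items (objective: alternative decomposition, similar cost).


-- ===== PORT A =====
-- Python str.islower(): some cased character and no uppercase one — exact on Dom's ASCII charset, where the cased characters are exactly the letters.
def pyIslower (s : String) : Bool :=
  s.toList.any PySem.Chars.isalpha && s.toList.all (fun c => !PySem.Chars.isupper c)

def is_small_cave (cave : String) : Bool :=
  pyIslower cave && !(cave == "start" || cave == "end")

def update_can_visit (can_visit_dict : List (String × Bool)) (path : List String) (max_visit : Int) : List (String × Bool) :=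
  let d := PySem.Dict.mk can_visit_dict          -- can_visit_dict.copy()
  let visited_small_cave_list := path.filter is_small_cave
  let trigger :=
    match PySem.List.pyGet? path (-1) with       -- path[-1]; none = IndexError, excluded by Pre_
    | none => false
    | some last_visited_cave =>
      visited_small_cave_list.contains last_visited_cave &&
        (match PySem.List.pyGet?
            (PySem.List.sorted (PySem.Dict.counter visited_small_cave_list).items (fun kv => kv.2) true)
            0 with                               -- Counter(...).most_common()[0]
         | some kv => decide (max_visit ≤ kv.2)
         | none => false)                        -- unreachable: the && shield means the list is nonempty
  if trigger then
    -- lazy filter over the dict being mutated: getD false stands for can_visit_dict[c]; a missing key (KeyError) is excluded by Pre_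
    (visited_small_cave_list.foldl
      (fun d c => if PySem.Dict.getD d c false then d.insert c false else d) d).items
  else d.items

-- ===== PORT B =====
-- the for-loop with break over the sorted small caves: prev starts as None, run as 0
def scanRun (mv : Int) : List String → Option String → Int → Bool
  | [], _, _ => false
  | c :: rest, prev, run =>
    let run' := if some c == prev then run + 1 else 1
    if mv ≤ run' then true else scanRun mv rest (some c) run'

def update_can_visit_alt (can_visit_dict : List (String × Bool)) (path : List String) (max_visit : Int) : List (String × Bool) :=
  match PySem.List.pyGet? path (-1) with         -- path[-1]; none = IndexError, excluded by Pre_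
  | none => can_visit_dict
  | some last =>
    if !is_small_cave last then can_visit_dict   -- dict(can_visit_dict)
    else
      let small_sorted := PySem.List.sorted (path.filter is_small_cave) (fun c => c) false
      let trigger := scanRun max_visit small_sorted none 0
      if !trigger then can_visit_dict
      else can_visit_dict.map (fun kv => (kv.1, if is_small_cave kv.1 && path.contains kv.1 then false else kv.2))

-- ===== PRECONDITION & SPEC =====
-- Pre_ excludes: (a) empty path, where both Pythons raise IndexError; (b) duplicate keys in the association
-- list, which cannot arise from a Python dict; (c) inputs where the rewrite triggers but some visited small
-- cave is missing from the dict, where A raises KeyError while B returns a value.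
def Pre_update_can_visit (can_visit_dict : List (String × Bool)) (path : List String) (max_visit : Int) : Prop :=
  path ≠ [] ∧ (can_visit_dict.map Prod.fst).Nodup ∧
  ((path.getLast?.any is_small_cave = true ∧
      ∃ c ∈ path, is_small_cave c = true ∧ max_visit ≤ (path.count c : Int)) →
    ∀ c ∈ path, is_small_cave c = true → c ∈ can_visit_dict.map Prod.fst)
instance (can_visit_dict : List (String × Bool)) (path : List String) (max_visit : Int) : Decidable (Pre_update_can_visit can_visit_dict path max_visit) := by unfold Pre_update_can_visit; infer_instance

def pvWitness_update_can_visit : (List (String × Bool)) × List String × Int :=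
  ([("start", true), ("a", true), ("b", true), ("end", true)], ["start", "a", "b", "a"], 2)

def Spec_update_can_visit (can_visit_dict : List (String × Bool)) (path : List String) (max_visit : Int) (out : List (String × Bool)) : Prop := out = update_can_visit_alt can_visit_dict path max_visit
instance (can_visit_dict : List (String × Bool)) (path : List String) (max_visit : Int) (out : List (String × Bool)) : Decidable (Spec_update_can_visit can_visit_dict path max_visit out) := by unfold Spec_update_can_visit; infer_instance

-- ===== CLAIM (what is proved, stated in full; the proofs are below) =====
def Claim_equal_update_can_visit : Prop := ∀ (can_visit_dict : List (String × Bool)) (path : List String) (max_visit : Int), Dom_update_can_visit can_visit_dict path max_visit → Pre_update_can_visit can_visit_dict path max_visit → Spec_update_can_visit can_visit_dict path max_visit (update_can_visit can_visit_dict path max_visit)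


-- ===== LEMMAS AND PROOFS =====

theorem pyGet_neg_one_getLast (xs : List String) (h : xs ≠ []) :
    PySem.List.pyGet? xs (-1) = xs.getLast? := by
  have hl : 0 < xs.length := List.length_pos_iff.mpr h
  simp only [PySem.List.pyGet?, PySem.List.pyIdx?]
  rw [if_neg (by norm_num), if_pos (by omega)]
  simp [List.getLast?_eq_getElem?, List.getElem?_eq_getElem (by omega : xs.length - 1 < xs.length)]

-- A's in-place loop over the visited small caves rewrites the items list pointwise.
theorem fold_mark_eq_map (xs : List String) (d : PySem.Dict String Bool)
    (hnd : d.keys.Nodup) (hk : ∀ c ∈ xs, c ∈ d.keys) :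
    (xs.foldl (fun d c => if PySem.Dict.getD d c false then d.insert c false else d) d).items
      = d.items.map (fun kv => (kv.1, if xs.contains kv.1 then false else kv.2)) := by
  induction xs generalizing d with
  | nil => simp
  | cons c xs ih =>
    have hcmem : c ∈ d.keys := hk c (List.mem_cons_self)
    have hcon : d.contains c = true := by
      rw [PySem.Dict.contains_eq_decide_mem_keys]; exact decide_eq_true hcmem
    have hstep : (if PySem.Dict.getD d c false then d.insert c false else d).items
        = d.items.map (fun kv => (kv.1, if kv.1 == c then false else kv.2)) := by
      by_cases hv : PySem.Dict.getD d c false = true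
      · rw [if_pos hv, PySem.Dict.items_insert_of_contains d false hcon]
        apply List.map_congr_left
        rintro ⟨k, v⟩ _
        by_cases hkc : k = c <;> simp [hkc]
      · rw [if_neg hv]
        conv_lhs => rw [← List.map_id d.items]
        apply List.map_congr_left
        rintro ⟨k, v⟩ hp
        by_cases hkc : k = c
        · have hval : PySem.Dict.getD d k false = v :=
            PySem.Dict.getD_of_mem_items d hp hnd false
          rw [hkc] at hval
          have : v = false := by rw [← hval]; exact eq_false_of_ne_true hv
          simp [hkc, this]
        · simp [hkc]
    have hkeys : (if PySem.Dict.getD d c false then d.insert c false else d).keys = d.keys := by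
      by_cases hv : PySem.Dict.getD d c false = true
      · rw [if_pos hv]; simp [pysem, hcon]
      · rw [if_neg hv]
    rw [List.foldl_cons, ih _ (by rw [hkeys]; exact hnd) (by rw [hkeys]; exact fun a ha => hk a (List.mem_cons_of_mem _ ha)),
        hstep, List.map_map]
    apply List.map_congr_left
    rintro ⟨k, v⟩ _
    by_cases hb : k = c <;> by_cases hx : k ∈ xs <;>
      simp [Function.comp, hb, hx]

-- the head count of most_common equals "some count reaches the bound" (the head is a maximum)
theorem most_common_head_any (xs : List String) (mv : Int) (m : String × Int) (t : List (String × Int))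
    (hs : PySem.List.sorted (PySem.Dict.counter xs).items (fun kv => kv.2) true = m :: t) :
    decide (mv ≤ m.2) = (PySem.Dict.counter xs).values.any (fun n => decide (mv ≤ n)) := by
  have hmem : m ∈ (PySem.Dict.counter xs).items := by
    rw [← PySem.List.mem_sorted (key := fun kv => kv.2) (rev := true), hs]
    exact List.mem_cons_self
  have hmax := PySem.List.key_head_sorted_rev_ge _ _ hs
  cases hany : (PySem.Dict.counter xs).values.any (fun n => decide (mv ≤ n)) with
  | true =>
    obtain ⟨n, hn, hmvn⟩ := List.any_eq_true.mp hany
    obtain ⟨kv, hkv, rfl⟩ := List.mem_map.mp hn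
    exact decide_eq_true (le_trans (of_decide_eq_true hmvn) (hmax kv hkv))
  | false =>
    refine decide_eq_false ?_
    intro hle
    have := List.any_eq_false.mp hany m.2 (List.mem_map.mpr ⟨m, hmem, rfl⟩)
    exact this (decide_eq_true hle)

-- the run-length scan over a ≤-sorted tail, after a run of p of length r has been consumed
theorem scanRun_aux (mv : Int) (s : List String) (p : String) (r : Int)
    (hs : s.Pairwise (· ≤ ·)) (hp : ∀ c ∈ s, p ≤ c) :
    scanRun mv s (some p) r
      = decide ((p ∈ s ∧ mv ≤ r + (s.count p : Int)) ∨ ∃ c ∈ s, c ≠ p ∧ mv ≤ (s.count c : Int)) := by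
  induction s generalizing p r with
  | nil => simp [scanRun]
  | cons c t ih =>
    have hpc : p ≤ c := hp c List.mem_cons_self
    have hts : t.Pairwise (· ≤ ·) := hs.of_cons
    by_cases hcp : c = p
    · subst hcp
      simp only [scanRun, beq_self_eq_true, if_true]
      by_cases hfire : mv ≤ r + 1
      · rw [if_pos hfire]
        have : (0:Int) ≤ (t.count c : Int) := by positivity
        simp only [List.count_cons_self, List.mem_cons_self]
        symm; rw [decide_eq_true_iff]
        left; constructor
        · simp
        · omega
      · rw [if_neg hfire, ih c (r+1) hts (fun x hx => List.rel_of_pairwise_cons hs hx)]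
        congr 1
        apply propext
        constructor
        · rintro (⟨hm, hc⟩ | ⟨c', hc', hne, hcnt⟩)
          · exact Or.inl ⟨List.mem_cons_self, by simpa [List.count_cons_self] using (by omega : mv ≤ r + ((t.count c : Int) + 1))⟩
          · exact Or.inr ⟨c', List.mem_cons_of_mem _ hc', hne, by rwa [List.count_cons_of_ne (fun h => hne h.symm)]⟩
        · rintro (⟨_, hc⟩ | ⟨c', hc', hne, hcnt⟩)
          · by_cases hm : c ∈ t
            · exact Or.inl ⟨hm, by simp [List.count_cons_self] at hc; omega⟩
            · exfalso; apply hfire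
              have : t.count c = 0 := List.count_eq_zero.mpr hm
              simp [List.count_cons_self, this] at hc; omega
          · rcases List.mem_cons.mp hc' with rfl | hc't
            · exact absurd rfl hne
            · exact Or.inr ⟨c', hc't, hne, by rwa [List.count_cons_of_ne (fun h => hne h.symm)] at hcnt⟩
    · -- new value: p < c, so p never occurs again
      have hplt : p < c := lt_of_le_of_ne hpc (fun h => hcp h.symm)
      have hnotp : ∀ x ∈ c :: t, x ≠ p := by
        intro x hx
        rcases List.mem_cons.mp hx with rfl | hxt
        · exact hcp
        · have := List.rel_of_pairwise_cons hs hxt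
          exact fun h => absurd (h ▸ this) (not_le.mpr hplt)
      have hbeq : (some c == some p) = false := by
        simp [hcp]
      simp only [scanRun, hbeq, Bool.false_eq_true, if_false]
      by_cases hfire : mv ≤ (1:Int)
      · rw [if_pos hfire]
        symm; rw [decide_eq_true_iff]
        refine Or.inr ⟨c, List.mem_cons_self, hcp, ?_⟩
        have : 1 ≤ (c :: t).count c := List.count_pos_iff.mpr List.mem_cons_self
        omega
      · rw [if_neg hfire, ih c 1 hts (fun x hx => List.rel_of_pairwise_cons hs hx)]
        have hpnot : p ∉ c :: t := fun h => hnotp p h rfl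
        congr 1
        apply propext
        constructor
        · rintro (⟨hm, hc⟩ | ⟨c', hc', hne, hcnt⟩)
          · exact Or.inr ⟨c, List.mem_cons_self, hcp, by simpa [List.count_cons_self] using (by omega : mv ≤ (t.count c : Int) + 1)⟩
          · exact Or.inr ⟨c', List.mem_cons_of_mem _ hc', hnotp c' (List.mem_cons_of_mem _ hc'), by rwa [List.count_cons_of_ne (fun h => hne h.symm)]⟩
        · rintro (⟨hm, _⟩ | ⟨c', hc', _, hcnt⟩)
          · exact absurd hm hpnot
          · rcases List.mem_cons.mp hc' with rfl | hc't
            · by_cases hm : c' ∈ t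
              · exact Or.inl ⟨hm, by simp [List.count_cons_self] at hcnt; omega⟩
              · exfalso; apply hfire
                have : t.count c' = 0 := List.count_eq_zero.mpr hm
                simp [List.count_cons_self, this] at hcnt; omega
            · by_cases hcc : c' = c
              · subst hcc
                exact Or.inl ⟨hc't, by simp [List.count_cons_self] at hcnt; omega⟩
              · exact Or.inr ⟨c', hc't, hcc, by rwa [List.count_cons_of_ne (fun h => hcc h.symm)] at hcnt⟩

-- the whole scan of the sorted small caves answers "some cave is visited at least mv times"
theorem scanRun_sorted_eq (mv : Int) (l : List String) :
    scanRun mv (PySem.List.sorted l (fun c => c) false) none 0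
      = decide (∃ c ∈ l, mv ≤ (l.count c : Int)) := by
  set s := PySem.List.sorted l (fun c => c) false with hsdef
  have hperm : s.Perm l := PySem.List.sorted_perm l (fun c => c) false
  have hpw : s.Pairwise (· ≤ ·) := PySem.List.sorted_pairwise l (fun c => c)
  have hcnt : ∀ c, s.count c = l.count c := fun c => hperm.count_eq c
  have hmem : ∀ c, c ∈ s ↔ c ∈ l := fun c => hperm.mem_iff
  cases hsv : s with
  | nil =>
    have : l = [] := by
      have := hperm; rw [hsv] at this; exact this.symm.eq_nil
    simp [scanRun, this]
  | cons c t =>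
    rw [hsv] at hpw hcnt hmem
    simp only [scanRun]
    have hbeq : (some c == (none : Option String)) = false := rfl
    rw [hbeq]
    simp only [Bool.false_eq_true, if_false]
    by_cases hfire : mv ≤ (1:Int)
    · rw [if_pos hfire]
      symm; rw [decide_eq_true_iff]
      refine ⟨c, (hmem c).mp List.mem_cons_self, ?_⟩
      have : 1 ≤ l.count c := List.count_pos_iff.mpr ((hmem c).mp List.mem_cons_self)
      omega
    · rw [if_neg hfire, scanRun_aux mv t c 1 hpw.of_cons (fun x hx => List.rel_of_pairwise_cons hpw hx)]
      congr 1
      apply propext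
      constructor
      · rintro (⟨hm, hc⟩ | ⟨c', hc', hne, hcnt'⟩)
        · refine ⟨c, (hmem c).mp List.mem_cons_self, ?_⟩
          rw [← hcnt c]
          simp [List.count_cons_self] at *; omega
        · refine ⟨c', (hmem c').mp (List.mem_cons_of_mem _ hc'), ?_⟩
          rw [← hcnt c', List.count_cons_of_ne (fun h => hne h.symm)]; exact hcnt'
      · rintro ⟨c', hc', hcnt'⟩
        rw [← hcnt c'] at hcnt'
        rcases List.mem_cons.mp ((hmem c').mpr hc') with rfl | hc't
        · by_cases hm : c' ∈ t
          · exact Or.inl ⟨hm, by simp [List.count_cons_self] at hcnt'; omega⟩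
          · exfalso; apply hfire
            have : t.count c' = 0 := List.count_eq_zero.mpr hm
            simp [List.count_cons_self, this] at hcnt'; omega
        · by_cases hcc : c' = c
          · subst hcc
            exact Or.inl ⟨hc't, by simp [List.count_cons_self] at hcnt'; omega⟩
          · exact Or.inr ⟨c', hc't, hcc, by rwa [List.count_cons_of_ne (fun h => hcc h.symm)] at hcnt'⟩

-- Counter values reaching the bound = some element's count reaching the bound
theorem counter_values_any (l : List String) (mv : Int) :
    (PySem.Dict.counter l).values.any (fun n => decide (mv ≤ n))
      = decide (∃ c ∈ l, mv ≤ (l.count c : Int)) := by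
  cases hany : (PySem.Dict.counter l).values.any (fun n => decide (mv ≤ n)) with
  | true =>
    obtain ⟨n, hn, hmvn⟩ := List.any_eq_true.mp hany
    have : n ∈ (PySem.Dict.counter l).items.map (·.2) := hn
    rw [PySem.Dict.items_counter] at this
    simp only [List.map_map] at this
    obtain ⟨k, hk, rfl⟩ := List.mem_map.mp this
    symm; rw [decide_eq_true_iff]
    exact ⟨k, (PySem.Set.mem_ofList _ _).mp hk, of_decide_eq_true hmvn⟩
  | false =>
    symm; rw [decide_eq_false_iff_not]
    rintro ⟨c, hc, hcnt⟩
    have hmemv : (l.count c : Int) ∈ (PySem.Dict.counter l).values := by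
      show _ ∈ (PySem.Dict.counter l).items.map (·.2)
      rw [PySem.Dict.items_counter]
      simp only [List.map_map]
      exact List.mem_map.mpr ⟨c, (PySem.Set.mem_ofList _ _).mpr hc, rfl⟩
    have := List.any_eq_false.mp hany _ hmemv
    exact this (decide_eq_true hcnt)

-- ===== VERDICT (by name: the statement is the Claim_ definition above) =====
theorem update_can_visit_spec : Claim_equal_update_can_visit := by
  intro cvd path mv _ hpre
  obtain ⟨hne, hnd, himp⟩ := hpre
  obtain ⟨last, hlast⟩ : ∃ l, path.getLast? = some l :=
    Option.isSome_iff_exists.mp (List.getLast?_isSome.mpr hne)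
  have hmemlast : last ∈ path := List.mem_of_getLast? hlast
  unfold Spec_update_can_visit update_can_visit update_can_visit_alt
  rw [pyGet_neg_one_getLast path hne, hlast]
  simp only
  have hcl : (path.filter is_small_cave).contains last = is_small_cave last := by
    by_cases hs : is_small_cave last = true <;> simp [List.mem_filter, hmemlast, hs]
  rw [hcl]
  cases hsm : is_small_cave last with
  | false => simp
  | true =>
    simp only [Bool.not_true, Bool.false_eq_true, if_false]
    have hlf : last ∈ path.filter is_small_cave := List.mem_filter.mpr ⟨hmemlast, hsm⟩
    have hine : (PySem.Dict.counter (path.filter is_small_cave)).items ≠ [] := by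
      rw [PySem.Dict.items_counter]
      simp only [ne_eq, List.map_eq_nil_iff]
      intro hnil
      exact (List.ne_nil_of_mem ((PySem.Set.mem_ofList _ _).mpr hlf)) hnil
    obtain ⟨m, t, hs⟩ : ∃ m t, PySem.List.sorted (PySem.Dict.counter (path.filter is_small_cave)).items (fun kv => kv.2) true = m :: t := by
      rcases hsv : PySem.List.sorted (PySem.Dict.counter (path.filter is_small_cave)).items (fun kv => kv.2) true with _ | ⟨m, t⟩
      · exact absurd ((PySem.List.sorted_eq_nil_iff _ _ _).mp hsv) hine
      · exact ⟨m, t, rfl⟩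
    rw [hs]
    have h0 : PySem.List.pyGet? (m :: t) (0 : Int) = some m := by simp [pysem]
    rw [h0]
    simp only [Bool.true_and]
    rw [most_common_head_any _ mv m t hs, counter_values_any, ← scanRun_sorted_eq]
    cases hany : scanRun mv (PySem.List.sorted (path.filter is_small_cave) (fun c => c) false) none 0 with
    | false => simp
    | true =>
      simp only [Bool.not_true, Bool.false_eq_true, if_false, if_true]
      -- the trigger fired: Pre_'s implication supplies every visited small cave as a key
      rw [scanRun_sorted_eq] at hany
      obtain ⟨k, hkfilter, hkcnt⟩ := of_decide_eq_true hany
      obtain ⟨hkpath, hksm⟩ := List.mem_filter.mp hkfilter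
      have hcount : (path.filter is_small_cave).count k = path.count k := List.count_filter hksm
      have hkeysall : ∀ c ∈ path, is_small_cave c = true → c ∈ cvd.map Prod.fst := by
        apply himp
        refine ⟨by rw [hlast]; simpa using hsm, k, hkpath, hksm, ?_⟩
        rw [← hcount]; exact hkcnt
      have hkeysmk : (PySem.Dict.mk cvd).keys = cvd.map Prod.fst := rfl
      rw [fold_mark_eq_map _ (PySem.Dict.mk cvd) (by rw [hkeysmk]; exact hnd)
            (by rw [hkeysmk]; intro c hc
                obtain ⟨hcp, hcs⟩ := List.mem_filter.mp hc
                exact hkeysall c hcp hcs)]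
      have hitems : (PySem.Dict.mk cvd).items = cvd := rfl
      rw [hitems]
      apply List.map_congr_left
      rintro ⟨a, b⟩ _
      simp only
      congr 1
      by_cases hsa : is_small_cave a = true <;>
        by_cases hpa : a ∈ path <;>
        simp [List.mem_filter, hsa, hpa]
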